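-- pv_equiv track=rewrite | github.com/rodoHasArrived/Meridian | build/scripts/ai-repo-updater.py | is_inside_string_literal
-- ===== SOURCE A (Python) =====
-- def is_inside_string_literal(line: str, index: int) -> bool:
--     """Return True when the given character index falls within a double-quoted string."""
--     in_string = False
--     escaped = False
--     for i, ch in enumerate(line):
--         if i >= index:
--             break
--         if escaped:
--             escaped = False
--             continue
--         if ch == '\\':
--             escaped = True
--             continue
--         if ch == '"':
--             in_string = not in_string
--     return in_string
-- ===== SOURCE B (Python) =====
-- def is_inside_string_literal(line: str, index: int) -> bool:
--     """Return True when the given character index falls within a double-quoted string.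
--
--     Two-stage computation: stage 1 records, for each position of the truncated
--     prefix, the length of the backslash run immediately preceding it; stage 2
--     counts the quotes preceded by an even run (i.e. unescaped quotes) and
--     returns the parity of that count.
--     """
--     prefix = line[:max(0, index)]
--     runs = []
--     r = 0
--     for ch in prefix:
--         runs.append(r)
--         r = r + 1 if ch == '\\' else 0
--     quotes = sum(1 for ch, rb in zip(prefix, runs) if ch == '"' and rb % 2 == 0)
--     return quotes % 2 == 1
-- ===== Notes on version B (the rewrite author's own statement) =====
-- stated objective: alternative
-- what changed: Replaced the stateful toggle-and-skip scan (in_string/escaped flags with an in-loop index break) by a staged computation: slice the prefix first, build the list of backslash-run lengths preceding each position, then count the quotes preceded by an even run and return that count's parity.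
import Mathlib
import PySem

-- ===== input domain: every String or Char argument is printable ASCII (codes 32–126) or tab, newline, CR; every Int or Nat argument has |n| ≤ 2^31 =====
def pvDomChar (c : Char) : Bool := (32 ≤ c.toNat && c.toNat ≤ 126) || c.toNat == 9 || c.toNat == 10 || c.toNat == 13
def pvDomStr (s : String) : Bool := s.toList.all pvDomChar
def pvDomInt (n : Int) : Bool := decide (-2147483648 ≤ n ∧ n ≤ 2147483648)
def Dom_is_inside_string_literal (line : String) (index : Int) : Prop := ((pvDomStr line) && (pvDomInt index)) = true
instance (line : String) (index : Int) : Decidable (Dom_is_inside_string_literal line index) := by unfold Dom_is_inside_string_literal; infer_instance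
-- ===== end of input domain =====

-- ===== PORT A =====
-- B replaces A's toggle-and-skip scan by a staged unescaped-quote-count
-- parity computation; return values are proved equal on Dom (alternative, same cost).
def goA : List Char → Int → Int → Bool → Bool → Bool
  | [], _, _, ins, _ => ins
  | c :: rest, i, index, ins, esc =>
    if i ≥ index then ins
    else if esc then goA rest (i + 1) index ins false
    else if c = '\\' then goA rest (i + 1) index ins true
    else if c = '"' then goA rest (i + 1) index (!ins) esc
    else goA rest (i + 1) index ins esc

def is_inside_string_literal (line : String) (index : Int) : Bool :=
  goA line.toList 0 index false false

-- ===== PORT B =====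
-- stage 1 of Source B: the list `runs` of backslash-run lengths preceding each char
def runsOf : List Char → Int → List Int
  | [], _ => []
  | c :: cs, r => r :: runsOf cs (if c = '\\' then r + 1 else 0)

def is_inside_string_literal_alt (line : String) (index : Int) : Bool :=
  let pre := line.toList.take (max 0 index).toNat
  let runs := runsOf pre 0
  -- stage 2 of Source B: count quotes preceded by an even run, return the parity
  let quotes := ((pre.zip runs).filter (fun p => p.1 = '"' ∧ p.2 % 2 = 0)).length
  quotes % 2 == 1

-- ===== PRECONDITION & SPEC =====
def Spec_is_inside_string_literal (line : String) (index : Int) (out : Bool) : Prop := out = is_inside_string_literal_alt line index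
instance (line : String) (index : Int) (out : Bool) : Decidable (Spec_is_inside_string_literal line index out) := by unfold Spec_is_inside_string_literal; infer_instance

-- ===== CLAIM (what is proved, stated in full; the proofs are below) =====
def Claim_equal_is_inside_string_literal : Prop := ∀ (line : String) (index : Int), Dom_is_inside_string_literal line index → Spec_is_inside_string_literal line index (is_inside_string_literal line index)

-- ===== LEMMAS AND PROOFS =====
-- A's loop without the index bookkeeping
def runA : List Char → Bool → Bool → Bool
  | [], ins, _ => ins
  | c :: rest, ins, esc =>
    if esc then runA rest ins false
    else if c = '\\' then runA rest ins true
    else if c = '"' then runA rest (!ins) esc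
    else runA rest ins esc

-- the count B computes, as a recursion
def cntB (l : List Char) (r : Int) : Nat :=
  ((l.zip (runsOf l r)).filter (fun p => p.1 = '"' ∧ p.2 % 2 = 0)).length

theorem cntB_cons (c : Char) (cs : List Char) (r : Int) :
    cntB (c :: cs) r =
      (if c = '"' ∧ r % 2 = 0 then 1 else 0) + cntB cs (if c = '\\' then r + 1 else 0) := by
  simp only [cntB, runsOf, List.zip_cons_cons, List.filter_cons]
  by_cases h : c = '"' ∧ r % 2 = 0
  · rw [if_pos (decide_eq_true h), if_pos h]; simp [Nat.add_comm]
  · rw [if_neg (by simp only [decide_eq_true_eq]; exact h), if_neg h]; simp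

theorem goA_eq_runA_take (l : List Char) (index : Int) :
    ∀ (i : Int) (ins esc : Bool),
      goA l i index ins esc = runA (l.take (index - i).toNat) ins esc := by
  induction l with
  | nil => intro i ins esc; simp [goA, runA]
  | cons c rest ih =>
    intro i ins esc
    by_cases hge : i ≥ index
    · have h0 : (index - i).toNat = 0 := by omega
      simp [goA, hge, h0, runA]
    · have h1 : (index - i).toNat = (index - (i + 1)).toNat + 1 := by omega
      rw [h1]
      simp only [goA, if_neg hge, List.take_succ_cons, runA]
      split_ifs <;> simp_all [ih (i + 1)]

theorem parity_step (k : Int) :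
    decide ((k + 1) % 2 = 1) = !decide (k % 2 = 1) := by
  rcases Int.emod_two_eq_zero_or_one k with h | h <;>
    simp [Int.add_emod, h]

theorem runA_eq_parity (l : List Char) :
    ∀ (r : Int) (ins esc : Bool), esc = decide (r % 2 = 1) →
      runA l ins esc = (xor ins (decide (cntB l r % 2 = 1))) := by
  induction l with
  | nil => intro r ins esc _; simp [runA, cntB]
  | cons c cs ih =>
    intro r ins esc hesc
    rw [cntB_cons]
    by_cases hodd : r % 2 = 1
    · -- this char is escaped: runA skips it, cntB does not count it
      have he : esc = true := by simp [hesc, hodd]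
      have hq : ¬ (c = '"' ∧ r % 2 = 0) := by rintro ⟨_, h0⟩; omega
      have hfr : (false : Bool) = decide ((if c = '\\' then r + 1 else 0) % 2 = 1) := by
        by_cases hbs : c = '\\' <;> simp [hbs, parity_step, hodd]
      rw [he]
      simp only [runA, if_true, if_neg hq, Nat.zero_add]
      rw [ih _ ins false hfr]
    · have hev : r % 2 = 0 := by
        rcases Int.emod_two_eq_zero_or_one r with h | h
        · exact h
        · exact absurd h hodd
      have he : esc = false := by simp [hesc, hodd]
      rw [he]
      by_cases hbs : c = '\\'
      · subst hbs
        have hq : ¬ (('\\' : Char) = '"' ∧ r % 2 = 0) := by rintro ⟨h, _⟩; exact absurd h (by decide)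
        have hL : runA ('\\' :: cs) ins false = runA cs ins true := by simp [runA]
        rw [hL, ih (r + 1) ins true (by simp [parity_step, hev]), if_neg hq,
          if_pos (rfl : ('\\' : Char) = '\\')]
        simp
      · by_cases hqc : c = '"'
        · subst hqc
          have hq : (('"' : Char) = '"' ∧ r % 2 = 0) := ⟨rfl, hev⟩
          have hL : runA ('"' :: cs) ins false = runA cs (!ins) false := by simp [runA]
          rw [hL, ih 0 (!ins) false (by decide), if_pos hq,
            if_neg (by decide : ¬ ('"' : Char) = '\\')]
          have hpar : decide ((1 + cntB cs 0) % 2 = 1) = !decide (cntB cs 0 % 2 = 1) := by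
            rcases Nat.mod_two_eq_zero_or_one (cntB cs 0) with h | h <;> simp [Nat.add_mod, h]
          rw [hpar]
          cases ins <;> cases decide (cntB cs 0 % 2 = 1) <;> rfl
        · have hq : ¬ (c = '"' ∧ r % 2 = 0) := by rintro ⟨h, _⟩; exact hqc h
          simp only [runA, Bool.false_eq_true, if_false, if_neg hbs, if_neg hqc, if_neg hq,
            Nat.zero_add]
          rw [ih 0 ins false (by decide)]

theorem decide_eq_beq (n m : Nat) : decide (n = m) = (n == m) := by
  by_cases h : n = m <;> simp [h]

-- ===== VERDICT (by name: the statement is the Claim_ definition above) =====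
theorem is_inside_string_literal_spec : Claim_equal_is_inside_string_literal := by
  intro line index _
  unfold Spec_is_inside_string_literal is_inside_string_literal is_inside_string_literal_alt
  rw [goA_eq_runA_take]
  have hmax : (index - 0).toNat = (max 0 index).toNat := by omega
  rw [hmax, runA_eq_parity _ 0 false false (by decide)]
  simp only [Bool.false_xor]
  exact decide_eq_beq _ _
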